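-- pv_equiv track=rewrite | github.com/pypi-data/pypi-mirror-74 | packages/hrtpsnlpsdk/hrtpsnlpsdk-0.1.9-py3-none-any.whl/hrtps/overtalk/__init__.py | convert_tokens_to_origin_index
-- ===== SOURCE A (Python) =====
-- def convert_tokens_to_origin_index(tokens, raw_text, max_seq_length):
--   all_text = u''
--   start_pos = 0
--   tok_to_orig_index = list()
--   orig_to_tok_index = list()
--   for i, token in enumerate(tokens):
--     if token[:2] == "##":
--       token = token[2:]
--     findIdx = raw_text.find(token, start_pos)
--     if findIdx == -1:
--       end_pos = start_pos + len(token) # force add length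
--     else:
--       start_pos = findIdx
--       end_pos = start_pos + len(token)
--     # tok_to_orig_index update
--     tok_to_orig_index.append(start_pos)
--
--     # orig_to_tok_index update
--     while len(orig_to_tok_index) < start_pos:
--       if orig_to_tok_index:
--         orig_to_tok_index.append(orig_to_tok_index[-1])
--       else:
--         orig_to_tok_index.append(0)
--     for j in range(start_pos, end_pos):
--       orig_to_tok_index.append(i)
--
--     start_pos = end_pos
--   return tok_to_orig_index, orig_to_tok_index
-- ===== SOURCE B (Python) =====
-- def convert_tokens_to_origin_index(tokens, raw_text, max_seq_length):
--     # pass 1: align each token to a span in raw_text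
--     spans = []
--     tok_to_orig_index = []
--     start_pos = 0
--     for i, token in enumerate(tokens):
--         t = token[2:] if token[:2] == "##" else token
--         idx = raw_text.find(t, start_pos)
--         if idx != -1:
--             start_pos = idx
--         end_pos = start_pos + len(t)
--         tok_to_orig_index.append(start_pos)
--         spans.append((start_pos, end_pos, i))
--         start_pos = end_pos
--     # pass 2: expand the spans into the reverse index
--     orig_to_tok_index = []
--     last = 0
--     for s, e, i in spans:
--         orig_to_tok_index.extend([last] * (s - len(orig_to_tok_index)))
--         orig_to_tok_index.extend([i] * (e - s))
--         if e > s: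
--             last = i
--     return tok_to_orig_index, orig_to_tok_index
-- ===== Notes on version B (the rewrite author's own statement) =====
-- stated objective: alternative
-- what changed: A's single pass that interleaves token alignment with growing the reverse index via while/for inner loops is split into two passes: pass 1 aligns tokens to (start, end, i) spans, pass 2 expands the spans into orig_to_tok_index using list replication and a tracked last value instead of repeated orig[-1] appends.
import Mathlib
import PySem

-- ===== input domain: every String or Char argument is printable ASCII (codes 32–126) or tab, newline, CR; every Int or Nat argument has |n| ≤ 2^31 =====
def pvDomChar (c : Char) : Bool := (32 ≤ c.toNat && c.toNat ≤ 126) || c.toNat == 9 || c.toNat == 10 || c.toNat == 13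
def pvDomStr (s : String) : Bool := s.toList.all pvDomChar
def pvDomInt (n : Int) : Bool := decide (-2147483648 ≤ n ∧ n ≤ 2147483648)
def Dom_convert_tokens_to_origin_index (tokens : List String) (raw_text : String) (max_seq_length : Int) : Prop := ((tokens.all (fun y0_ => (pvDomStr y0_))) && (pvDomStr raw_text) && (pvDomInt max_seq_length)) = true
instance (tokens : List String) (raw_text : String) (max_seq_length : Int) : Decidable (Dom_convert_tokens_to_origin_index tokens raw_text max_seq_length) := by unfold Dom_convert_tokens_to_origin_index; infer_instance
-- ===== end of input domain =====

-- B replaces A's single pass (with its while/for inner loops growing orig_to_tok_index)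
-- by two passes: pass 1 aligns tokens to (start, end, i) spans, pass 2 expands the spans
-- with list-replication and a tracked `last` value; objective: simpler decomposition.
-- max_seq_length is unused by the Python and kept only for the signature.

-- ===== PORT A =====
-- the `while len(orig_to_tok_index) < start_pos:` loop of A; the appended value is
-- orig[-1] if orig is nonempty else 0, i.e. List.getLastD orig 0 (exact)
def pvPadA (orig : List Int) (target : Int) : List Int :=
  if (orig.length : Int) < target then
    pvPadA (orig ++ [orig.getLastD 0]) target
  else orig
termination_by (target - orig.length).toNat
decreasing_by simp; omega

def pvStepA (raw_text : String) (st : Int × List Int × List Int) (p : Int × String) :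
    Int × List Int × List Int :=
  let start_pos := st.1
  let token := if PySem.Str.slice p.2 none (some 2) = "##"
               then PySem.Str.slice p.2 (some 2) none else p.2
  let findIdx := PySem.Str.findFrom raw_text token start_pos
  let sp := if findIdx = -1 then start_pos else findIdx
  let end_pos := sp + PySem.Str.len token
  let tok_to_orig := st.2.1 ++ [sp]
  let orig_to_tok := pvPadA st.2.2 sp
  let orig_to_tok := (PySem.List.pyRange sp end_pos 1).foldl (fun acc _ => acc ++ [p.1]) orig_to_tok
  (end_pos, tok_to_orig, orig_to_tok)

def convert_tokens_to_origin_index (tokens : List String) (raw_text : String)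
    (max_seq_length : Int) : List Int × List Int :=
  let r := (PySem.List.enumerate tokens 0).foldl (pvStepA raw_text) (0, [], [])
  (r.2.1, r.2.2)

-- ===== PORT B =====
-- pass 1: state (start_pos, tok_to_orig_index, spans)
def pvStepB1 (raw_text : String) (st : Int × List Int × List (Int × Int × Int))
    (p : Int × String) : Int × List Int × List (Int × Int × Int) :=
  let t := if PySem.Str.slice p.2 none (some 2) = "##"
           then PySem.Str.slice p.2 (some 2) none else p.2
  let idx := PySem.Str.findFrom raw_text t st.1
  let s := if idx ≠ -1 then idx else st.1
  let e := s + PySem.Str.len t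
  (e, st.2.1 ++ [s], st.2.2 ++ [(s, e, p.1)])

-- pass 2: state (orig_to_tok_index, last)
def pvStepB2 (st : List Int × Int) (sp : Int × Int × Int) : List Int × Int :=
  let orig := st.1 ++ List.replicate (sp.1 - (st.1.length : Int)).toNat st.2
  let orig := orig ++ List.replicate (sp.2.1 - sp.1).toNat sp.2.2
  (orig, if sp.2.1 > sp.1 then sp.2.2 else st.2)

def convert_tokens_to_origin_index_alt (tokens : List String) (raw_text : String)
    (max_seq_length : Int) : List Int × List Int :=
  let r1 := (PySem.List.enumerate tokens 0).foldl (pvStepB1 raw_text) (0, [], [])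
  let r2 := r1.2.2.foldl pvStepB2 ([], 0)
  (r1.2.1, r2.1)

-- ===== PRECONDITION & SPEC =====
def Spec_convert_tokens_to_origin_index (tokens : List String) (raw_text : String) (max_seq_length : Int) (out : List Int × List Int) : Prop := out = convert_tokens_to_origin_index_alt tokens raw_text max_seq_length
instance (tokens : List String) (raw_text : String) (max_seq_length : Int) (out : List Int × List Int) : Decidable (Spec_convert_tokens_to_origin_index tokens raw_text max_seq_length out) := by unfold Spec_convert_tokens_to_origin_index; infer_instance

-- ===== CLAIM (what is proved, stated in full; the proofs are below) =====
def Claim_equal_convert_tokens_to_origin_index : Prop := ∀ (tokens : List String) (raw_text : String) (max_seq_length : Int), Dom_convert_tokens_to_origin_index tokens raw_text max_seq_length → Spec_convert_tokens_to_origin_index tokens raw_text max_seq_length (convert_tokens_to_origin_index tokens raw_text max_seq_length)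

-- ===== LEMMAS AND PROOFS =====

lemma getLastD_append_replicate (xs : List Int) (n : Nat) (x d : Int) :
    (xs ++ List.replicate n x).getLastD d = if n = 0 then xs.getLastD d else x := by
  cases n with
  | zero => simp
  | succ m =>
    rw [if_neg (Nat.succ_ne_zero m), List.replicate_succ', ← List.append_assoc,
      List.getLastD_concat]

lemma pvPadA_eq (orig : List Int) (t : Int) :
    pvPadA orig t = orig ++ List.replicate (t - orig.length).toNat (orig.getLastD 0) := by
  by_cases h : (orig.length : Int) < t
  · rw [pvPadA, if_pos h, pvPadA_eq (orig ++ [orig.getLastD 0]) t, List.getLastD_concat]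
    have hn : (t - orig.length).toNat = (t - (orig ++ [orig.getLastD 0]).length).toNat + 1 := by
      simp; omega
    rw [hn, List.replicate_succ]
    simp
  · rw [pvPadA, if_neg h]
    have hz : (t - orig.length).toNat = 0 := by omega
    simp [hz]
termination_by (t - orig.length).toNat
decreasing_by simp; omega

lemma foldl_append_const (l : List Int) (i : Int) (acc : List Int) :
    l.foldl (fun a _ => a ++ [i]) acc = acc ++ List.replicate l.length i := by
  induction l generalizing acc with
  | nil => simp
  | cons x xs ih =>
    rw [List.foldl_cons, ih, List.length_cons, List.replicate_succ]
    simp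

-- one A-iteration's orig_to_tok update is one pvStepB2 step, and pvStepB2 keeps
-- `last` equal to the last element (default 0) of the list it carries
lemma stepB2_eq (orig : List Int) (s i d : Int) (hd : 0 ≤ d) :
    pvStepB2 (orig, orig.getLastD 0) (s, s + d, i) =
      ((PySem.List.pyRange s (s + d) 1).foldl (fun acc _ => acc ++ [i]) (pvPadA orig s),
       ((PySem.List.pyRange s (s + d) 1).foldl (fun acc _ => acc ++ [i]) (pvPadA orig s)).getLastD 0) := by
  rw [foldl_append_const, pvPadA_eq, PySem.List.length_pyRange_one]
  simp only [pvStepB2]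
  rw [Prod.mk.injEq]
  refine ⟨rfl, ?_⟩
  have hsd : s + d - s = d := by ring
  rw [hsd, getLastD_append_replicate]
  by_cases h : 0 < d
  · rw [if_neg (by omega : ¬ d.toNat = 0), if_pos (by omega : s + d > s)]
  · have h0 : d = 0 := le_antisymm (not_lt.mp h) hd
    subst h0
    rw [if_pos (by omega : ((0:Int)).toNat = 0), if_neg (by omega : ¬ s + 0 > s),
      getLastD_append_replicate]
    split_ifs <;> rfl

-- pvStepB1's spans component is a pure accumulator
lemma B1_spans_acc (raw : String) (ps : List (Int × String)) :
    ∀ (st : Int) (tk : List Int) (sp : List (Int × Int × Int)),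
    ps.foldl (pvStepB1 raw) (st, tk, sp) =
      ((ps.foldl (pvStepB1 raw) (st, tk, [])).1,
       (ps.foldl (pvStepB1 raw) (st, tk, [])).2.1,
       sp ++ (ps.foldl (pvStepB1 raw) (st, tk, [])).2.2) := by
  induction ps with
  | nil => intro st tk sp; simp
  | cons p ps ih =>
    intro st tk sp
    simp only [List.foldl_cons, pvStepB1]
    conv_rhs => rw [ih]
    conv_lhs => rw [ih]
    rw [List.nil_append, List.append_assoc]

-- A's fold equals B's pass 1 followed by B's pass 2
lemma main_lemma (raw : String) (ps : List (Int × String)) :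
    ∀ (st : Int) (tk orig : List Int),
    ps.foldl (pvStepA raw) (st, tk, orig) =
      ((ps.foldl (pvStepB1 raw) (st, tk, [])).1,
       (ps.foldl (pvStepB1 raw) (st, tk, [])).2.1,
       (((ps.foldl (pvStepB1 raw) (st, tk, [])).2.2).foldl pvStepB2 (orig, orig.getLastD 0)).1) := by
  induction ps with
  | nil => intro st tk orig; simp
  | cons p ps ih =>
    intro st tk orig
    simp only [List.foldl_cons]
    set t := (if PySem.Str.slice p.2 none (some 2) = "##"
              then PySem.Str.slice p.2 (some 2) none else p.2) with ht
    set idx := PySem.Str.findFrom raw t st with hidx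
    set S : Int := if idx = -1 then st else idx with hS
    have hS' : (if idx ≠ -1 then idx else st) = S := by
      by_cases h : idx = -1 <;> simp [hS, h]
    have hL : (0:Int) ≤ PySem.Str.len t := by rw [PySem.Str.len_eq]; positivity
    have hA : pvStepA raw (st, tk, orig) p
        = (S + PySem.Str.len t, tk ++ [S],
           (PySem.List.pyRange S (S + PySem.Str.len t) 1).foldl
             (fun acc _ => acc ++ [p.1]) (pvPadA orig S)) := by
      simp only [pvStepA, ← ht, ← hidx, ← hS]
    have hB : pvStepB1 raw (st, tk, []) p
        = (S + PySem.Str.len t, tk ++ [S], [(S, S + PySem.Str.len t, p.1)]) := by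
      simp only [pvStepB1, ← ht, ← hidx, hS']
      rw [List.nil_append]
    rw [hA, hB, ih, B1_spans_acc raw ps _ _ [(S, S + PySem.Str.len t, p.1)]]
    rw [List.singleton_append, List.foldl_cons, stepB2_eq orig S p.1 (PySem.Str.len t) hL]

-- ===== VERDICT (by name: the statement is the Claim_ definition above) =====
theorem convert_tokens_to_origin_index_spec : Claim_equal_convert_tokens_to_origin_index := by
  intro tokens raw_text max_seq_length _
  unfold Spec_convert_tokens_to_origin_index convert_tokens_to_origin_index
    convert_tokens_to_origin_index_alt
  rw [main_lemma]
  rfl
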